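-- pv_equiv track=rewrite | github.com/RKCgiri/Python-Codes | Assignment 3 (String)/Bus Fare.py | getFare
-- ===== SOURCE A (Python) =====
-- import math
--
-- def getFare(Source, Destination):
--     # Given data
--     bus_stops = ["TH", "GA", "IC", "HA", "TE", "LU", "NI", "CA"]
--     path_distances = [800, 600, 750, 900, 1400, 1200, 1100, 1500]
--
--     # Convert input stops to uppercase for case insensitivity
--     source = Source.upper()
--     destination = Destination.upper()
--
--     # Validate input stops
--     if source not in bus_stops or destination not in bus_stops:
--         return "INVALID OUTPUT"
--
--     # Find the index of source and destination stops
--     source_index = bus_stops.index(source)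
--     destination_index = bus_stops.index(destination)
--
--     # Calculate total distance and fare
--     total_distance = 0
--     for i in range(source_index, destination_index):
--         total_distance += path_distances[i % len(bus_stops)]
--
--     fare = math.ceil(total_distance / 1000) * 5
--     return f"{float(fare)} INR"
-- ===== SOURCE B (Python) =====
-- import math
--
-- # cumulative distance from the first stop "TH" to each stop
-- _CUM = {"TH": 0, "GA": 800, "IC": 1400, "HA": 2150,
--         "TE": 3050, "LU": 4450, "NI": 5650, "CA": 6750}
--
-- def getFare(Source, Destination):
--     s = _CUM.get(Source.upper())
--     d = _CUM.get(Destination.upper())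
--     if s is None or d is None:
--         return "INVALID OUTPUT"
--     fare = math.ceil(max(0, d - s) / 1000) * 5
--     return f"{float(fare)} INR"
-- ===== Notes on version B (the rewrite author's own statement) =====
-- stated objective: simpler
-- what changed: Replaces the stop list + per-segment summation loop with a single dict mapping each stop to its cumulative distance: validation becomes two dict lookups and the distance a clamped difference max(0, d - s), no loop and no index() scans.
import Mathlib
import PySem

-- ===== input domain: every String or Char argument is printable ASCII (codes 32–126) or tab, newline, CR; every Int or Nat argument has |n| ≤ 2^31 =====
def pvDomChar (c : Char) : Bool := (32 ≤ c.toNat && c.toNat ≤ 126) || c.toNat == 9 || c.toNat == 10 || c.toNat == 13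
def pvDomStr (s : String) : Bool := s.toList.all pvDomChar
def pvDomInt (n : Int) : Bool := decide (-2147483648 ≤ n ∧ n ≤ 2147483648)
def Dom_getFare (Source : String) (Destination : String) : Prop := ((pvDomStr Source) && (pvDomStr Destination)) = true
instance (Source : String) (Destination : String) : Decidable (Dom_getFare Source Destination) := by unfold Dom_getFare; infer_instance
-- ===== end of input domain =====

-- B replaces A's stop list + per-segment summation loop by one dict of cumulative distances (simpler, no loop).

-- ===== PORT A =====
def getFare (Source : String) (Destination : String) : String :=
  let busStops : List String := ["TH", "GA", "IC", "HA", "TE", "LU", "NI", "CA"]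
  let pathDistances : List Int := [800, 600, 750, 900, 1400, 1200, 1100, 1500]
  let source := PySem.Str.upper Source
  let destination := PySem.Str.upper Destination
  if !(busStops.contains source) || !(busStops.contains destination) then
    "INVALID OUTPUT"
  else
    let sourceIndex : Int := ((PySem.List.index? busStops source).getD 0 : Nat)
    let destinationIndex : Int := ((PySem.List.index? busStops destination).getD 0 : Nat)
    -- index i % 8 is always in range here, so pyGetD is exact for path_distances[i % len(bus_stops)]
    let totalDistance : Int :=
      (PySem.List.pyRange sourceIndex destinationIndex 1).foldl
        (fun acc i => acc + PySem.List.pyGetD pathDistances (PySem.Int.mod i 8) 0) 0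
    -- math.ceil(total/1000) is exact integer ceiling division here (|total| small)
    let fare : Int := (-(PySem.Int.floordiv (-totalDistance) 1000)) * 5
    -- f"{float(fare)} INR": fare is a small nonnegative integer, float prints as "<fare>.0"
    PySem.Int.toStr fare ++ ".0 INR"

-- ===== PORT B =====
def cumDist : PySem.Dict String Int :=
  PySem.Dict.ofList [("TH", 0), ("GA", 800), ("IC", 1400), ("HA", 2150),
                     ("TE", 3050), ("LU", 4450), ("NI", 5650), ("CA", 6750)]

def getFare_alt (Source : String) (Destination : String) : String :=
  match cumDist.get? (PySem.Str.upper Source), cumDist.get? (PySem.Str.upper Destination) with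
  | some s, some d =>
    -- math.ceil(max(0, d-s)/1000) is exact integer ceiling division here (values small)
    let fare : Int := (-(PySem.Int.floordiv (-(max 0 (d - s))) 1000)) * 5
    PySem.Int.toStr fare ++ ".0 INR"
  | _, _ => "INVALID OUTPUT"

-- ===== PRECONDITION & SPEC =====
def Spec_getFare (Source : String) (Destination : String) (out : String) : Prop := out = getFare_alt Source Destination
instance (Source : String) (Destination : String) (out : String) : Decidable (Spec_getFare Source Destination out) := by unfold Spec_getFare; infer_instance

-- ===== CLAIM (what is proved, stated in full; the proofs are below) =====
def Claim_equal_getFare : Prop := ∀ (Source : String) (Destination : String), Dom_getFare Source Destination → Spec_getFare Source Destination (getFare Source Destination)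

-- ===== LEMMAS AND PROOFS =====

lemma cum_none (su : String) (h : su ∉ (["TH","GA","IC","HA","TE","LU","NI","CA"] : List String)) :
    cumDist.get? su = none := by
  simp [List.mem_cons, not_or] at h
  obtain ⟨h1,h2,h3,h4,h5,h6,h7,h8⟩ := h
  have e : cumDist = PySem.Dict.mk [("TH", 0), ("GA", 800), ("IC", 1400), ("HA", 2150),
                     ("TE", 3050), ("LU", 4450), ("NI", 5650), ("CA", 6750)] := by decide
  rw [e]
  simp [PySem.Dict.get?, Ne.symm h1, Ne.symm h2, Ne.symm h3, Ne.symm h4, Ne.symm h5,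
        Ne.symm h6, Ne.symm h7, Ne.symm h8]

lemma core_eq (S D : String) : getFare S D = getFare_alt S D := by
  unfold getFare getFare_alt
  generalize PySem.Str.upper S = su
  generalize PySem.Str.upper D = dv
  by_cases hs : su ∈ (["TH","GA","IC","HA","TE","LU","NI","CA"] : List String)
  · by_cases hd : dv ∈ (["TH","GA","IC","HA","TE","LU","NI","CA"] : List String)
    · simp only [List.mem_cons, List.not_mem_nil, or_false] at hs hd
      rcases hs with rfl|rfl|rfl|rfl|rfl|rfl|rfl|rfl <;>
        rcases hd with rfl|rfl|rfl|rfl|rfl|rfl|rfl|rfl <;> decide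
    · rw [cum_none dv hd]
      cases cumDist.get? su <;> simp [hs, hd]
  · rw [cum_none su hs]
    simp [hs]


-- ===== VERDICT (by name: the statement is the Claim_ definition above) =====
theorem getFare_spec : Claim_equal_getFare := by
  intro S D _
  unfold Spec_getFare
  exact core_eq S D
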